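-- pv_equiv track=rewrite | github.com/ghawkes1217/Conjectures-and-Computations | c-grothendieck/c-grothendieck.py | hook
-- ===== SOURCE A (Python) =====
-- def hook(A):
--     good=0
--     if len(A)>0:
--         good=1
--         mindex=0
--         for i in range(0,len(A)):
--             if A[i]==min(A):
--                 mindex=i
--         for i in range(0,mindex):
--             if A[i]<=A[i+1]:
--                 good=0
--         for i in range(mindex,len(A)-1):
--             if A[i]>=A[i+1]:
--                 good=0
--     return(good)
-- ===== SOURCE B (Python) =====
-- def hook(A):
--     # Phase walk: consume a strict descent, then a strict ascent; valid V iff we reach the end.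
--     i = 0
--     while i < len(A) - 1 and A[i] > A[i + 1]:
--         i += 1
--     while i < len(A) - 1 and A[i] < A[i + 1]:
--         i += 1
--     return 1 if len(A) > 0 and i == len(A) - 1 else 0
-- ===== Notes on version B (the rewrite author's own statement) =====
-- stated objective: faster
-- what changed: Replaces last-min search (with min(A) recomputed inside the loop) plus two fixed segment scans by a single two-phase pointer walk that never computes the minimum.
import Mathlib
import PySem

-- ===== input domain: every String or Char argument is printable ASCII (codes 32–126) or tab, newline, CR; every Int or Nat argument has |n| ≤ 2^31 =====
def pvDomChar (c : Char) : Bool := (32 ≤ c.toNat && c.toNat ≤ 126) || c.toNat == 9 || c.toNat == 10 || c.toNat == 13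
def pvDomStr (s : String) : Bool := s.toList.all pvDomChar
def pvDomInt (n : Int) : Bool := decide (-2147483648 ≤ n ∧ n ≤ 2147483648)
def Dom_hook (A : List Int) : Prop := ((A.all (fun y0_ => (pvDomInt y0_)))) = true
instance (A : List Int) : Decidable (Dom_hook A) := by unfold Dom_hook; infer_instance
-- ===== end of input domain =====

-- B replaces A's last-minimum search (min(A) recomputed inside the loop) and two segment
-- scans by a single two-phase pointer walk (strict descent, then strict ascent); measured faster.

-- ===== PORT A =====
def hook (A : List Int) : Int :=
  if 0 < A.length then
    let mindex := (List.range A.length).foldl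
      (fun md i => if A.getD i 0 = (PySem.List.min? A (fun x => x)).getD 0 then i else md) 0
    let good1 := (List.range mindex).foldl
      (fun g i => if A.getD i 0 ≤ A.getD (i+1) 0 then 0 else g) (1 : Int)
    let good2 := (List.range' mindex (A.length - 1 - mindex)).foldl
      (fun g i => if A.getD i 0 ≥ A.getD (i+1) 0 then 0 else g) good1
    good2
  else 0

-- ===== PORT B =====
-- first while loop of Source B: advance while the next element is strictly smaller
def walkDown (A : List Int) (i : Nat) : Nat :=
  if h : i + 1 < A.length ∧ A.getD i 0 > A.getD (i+1) 0 then walkDown A (i+1) else i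
termination_by A.length - i
decreasing_by obtain ⟨h1, _⟩ := h; omega

-- second while loop of Source B: advance while the next element is strictly larger
def walkUp (A : List Int) (i : Nat) : Nat :=
  if h : i + 1 < A.length ∧ A.getD i 0 < A.getD (i+1) 0 then walkUp A (i+1) else i
termination_by A.length - i
decreasing_by obtain ⟨h1, _⟩ := h; omega

def hook_alt (A : List Int) : Int :=
  let i := walkUp A (walkDown A 0)
  if 0 < A.length ∧ i = A.length - 1 then 1 else 0

-- ===== PRECONDITION & SPEC =====
def Spec_hook (A : List Int) (out : Int) : Prop := out = hook_alt A
instance (A : List Int) (out : Int) : Decidable (Spec_hook A out) := by unfold Spec_hook; infer_instance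

-- ===== CLAIM (what is proved, stated in full; the proofs are below) =====
def Claim_equal_hook : Prop := ∀ (A : List Int), Dom_hook A → Spec_hook A (hook A)

-- ===== LEMMAS AND PROOFS =====

-- a flag fold over a list returns 0 iff some element trips the condition
lemma foldl_flag (c : Nat → Prop) [DecidablePred c] (l : List Nat) (g : Int) :
    l.foldl (fun g i => if c i then 0 else g) g = if ∃ i ∈ l, c i then (0 : Int) else g := by
  induction l generalizing g with
  | nil => simp
  | cons a t ih =>
    simp only [List.foldl_cons, ih]
    by_cases h : c a
    · simp only [if_pos h]
      rw [if_pos (show ∃ i ∈ a :: t, c i from ⟨a, List.mem_cons_self, h⟩)]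
      split_ifs <;> rfl
    · simp only [if_neg h]
      have heq : (∃ i ∈ a :: t, c i) ↔ (∃ i ∈ t, c i) := by
        constructor
        · rintro ⟨i, hi, hc⟩
          rcases List.mem_cons.1 hi with rfl | hi'
          · exact absurd hc h
          · exact ⟨i, hi', hc⟩
        · rintro ⟨i, hi, hc⟩
          exact ⟨i, List.mem_cons_of_mem a hi, hc⟩
      rw [if_congr heq rfl rfl]

-- the last-match fold: no later index matches, and the result is d or a matching index < n
lemma foldl_last (p : Nat → Prop) [DecidablePred p] (n d : Nat) :
    (∀ j, j < n → (List.range n).foldl (fun md i => if p i then i else md) d < j → ¬ p j) ∧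
    ((List.range n).foldl (fun md i => if p i then i else md) d = d ∨
      ((List.range n).foldl (fun md i => if p i then i else md) d < n ∧
        p ((List.range n).foldl (fun md i => if p i then i else md) d))) := by
  induction n with
  | zero => simp
  | succ n ih =>
    rw [List.range_succ, List.foldl_append]
    simp only [List.foldl_cons, List.foldl_nil]
    by_cases h : p n
    · rw [if_pos h]
      exact ⟨fun j hj hlt => by omega, Or.inr ⟨by omega, h⟩⟩
    · rw [if_neg h]
      refine ⟨fun j hj hlt => ?_, ?_⟩
      · rcases Nat.lt_or_ge j n with h' | h'
        · exact ih.1 j h' hlt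
        · have : j = n := by omega
          subst this; exact h
      · rcases ih.2 with h' | ⟨h1, h2⟩
        · exact Or.inl h'
        · exact Or.inr ⟨by omega, h2⟩

lemma walk_unique {P : Nat → Prop} {i j k : Nat} (hij : i ≤ j) (hik : i ≤ k)
    (wj : ∀ t, i ≤ t → t < j → P t) (wk : ∀ t, i ≤ t → t < k → P t)
    (mj : ¬ P j) (mk : ¬ P k) : j = k := by
  rcases lt_trichotomy j k with h | h | h
  · exact absurd (wk j hij h) mj
  · exact h
  · exact absurd (wj k hik h) mk

lemma walkDown_spec (A : List Int) (i : Nat) :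
    i ≤ walkDown A i ∧
    (∀ t, i ≤ t → t < walkDown A i → t + 1 < A.length ∧ A.getD t 0 > A.getD (t+1) 0) ∧
    ¬ (walkDown A i + 1 < A.length ∧ A.getD (walkDown A i) 0 > A.getD (walkDown A i + 1) 0) := by
  fun_induction walkDown A i with
  | case1 i h ih =>
    obtain ⟨ih1, ih2, ih3⟩ := ih
    refine ⟨by omega, fun t ht1 ht2 => ?_, ih3⟩
    rcases Nat.lt_or_ge t (i+1) with h' | h'
    · have : t = i := by omega
      subst this; exact h
    · exact ih2 t h' ht2
  | case2 i h =>
    exact ⟨le_refl i, fun t ht1 ht2 => by omega, h⟩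

lemma walkUp_spec (A : List Int) (i : Nat) :
    i ≤ walkUp A i ∧
    (∀ t, i ≤ t → t < walkUp A i → t + 1 < A.length ∧ A.getD t 0 < A.getD (t+1) 0) ∧
    ¬ (walkUp A i + 1 < A.length ∧ A.getD (walkUp A i) 0 < A.getD (walkUp A i + 1) 0) := by
  fun_induction walkUp A i with
  | case1 i h ih =>
    obtain ⟨ih1, ih2, ih3⟩ := ih
    refine ⟨by omega, fun t ht1 ht2 => ?_, ih3⟩
    rcases Nat.lt_or_ge t (i+1) with h' | h'
    · have : t = i := by omega
      subst this; exact h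
    · exact ih2 t h' ht2
  | case2 i h =>
    exact ⟨le_refl i, fun t ht1 ht2 => by omega, h⟩

-- strict-descent chain: across a strictly decreasing stretch later values are smaller
lemma chain_desc (f : Nat → Int) (a b : Nat) (h : ∀ t, a ≤ t → t < b → f (t+1) < f t) :
    ∀ p q, a ≤ p → p < q → q ≤ b → f q < f p := by
  intro p q hap hpq hqb
  induction q with
  | zero => omega
  | succ q ih =>
    rcases Nat.lt_or_ge p q with h' | h'
    · exact lt_trans (h q (by omega) (by omega)) (ih (by omega) (by omega))
    · have : p = q := by omega
      subst this; exact h p hap (by omega)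

-- strict-ascent chain, same shape
lemma chain_asc (f : Nat → Int) (a b : Nat) (h : ∀ t, a ≤ t → t < b → f t < f (t+1)) :
    ∀ p q, a ≤ p → p < q → q ≤ b → f p < f q := by
  intro p q hap hpq hqb
  induction q with
  | zero => omega
  | succ q ih =>
    rcases Nat.lt_or_ge p q with h' | h'
    · exact lt_trans (ih (by omega) (by omega)) (h q (by omega) (by omega))
    · have : p = q := by omega
      subst this; exact h p hap (by omega)

lemma getD_mem (A : List Int) (j : Nat) (h : j < A.length) : A.getD j 0 ∈ A := by
  rw [List.getD_eq_getElem A 0 h]; exact List.getElem_mem h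

-- ===== VERDICT (by name: the statement is the Claim_ definition above) =====
theorem hook_spec : Claim_equal_hook := by
  intro A _
  unfold Spec_hook hook hook_alt
  by_cases hn : 0 < A.length
  case neg =>
    have hA : A = [] := by cases A <;> simp_all
    subst hA
    rw [walkDown, if_neg (by simp)]
    rw [walkUp, if_neg (by simp)]
  simp only [if_pos hn]
  set n := A.length with hnlen
  -- the minimum value
  obtain ⟨m, hm⟩ : ∃ m, PySem.List.min? A (fun x => x) = some m := by
    cases h : PySem.List.min? A (fun x => x) with
    | none =>
      rw [PySem.List.min?_eq_none_iff] at h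
      subst h
      simp at hnlen
      omega
    | some m => exact ⟨m, rfl⟩
  have hmmem : m ∈ A := PySem.List.min?_mem hm
  have hmmin : ∀ y ∈ A, m ≤ y := PySem.List.min?_isMin hm
  obtain ⟨k, hk, hkm⟩ : ∃ k, k < n ∧ A.getD k 0 = m := by
    obtain ⟨k, hk, hkm⟩ := List.mem_iff_getElem.1 hmmem
    exact ⟨k, hk, by rw [List.getD_eq_getElem A 0 hk]; exact hkm⟩
  have hm' : (PySem.List.min? A (fun x => x)).getD 0 = m := by rw [hm]; rfl
  rw [hm']
  have H := foldl_last (fun i => A.getD i 0 = m) n 0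
  generalize hmd : (List.range n).foldl (fun md i => if A.getD i 0 = m then i else md) 0 = md at H ⊢
  obtain ⟨hmd1, hmd2⟩ := H
  have hmdlt : md < n := by
    rcases hmd2 with h | ⟨h, _⟩
    · omega
    · exact h
  have hmdval : A.getD md 0 = m := by
    rcases hmd2 with h | ⟨_, h2⟩
    · by_cases hk0 : k = 0
      · subst hk0; rw [h]; exact hkm
      · exact absurd hkm (hmd1 k hk (by omega))
    · exact h2
  rw [foldl_flag (fun i => A.getD i 0 ≤ A.getD (i+1) 0)]
  rw [foldl_flag (fun i => A.getD i 0 ≥ A.getD (i+1) 0)]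
  have W := walkDown_spec A 0
  generalize hd : walkDown A 0 = d at W ⊢
  obtain ⟨-, hdw, hdm⟩ := W
  have U := walkUp_spec A d
  generalize hu : walkUp A d = u at U ⊢
  obtain ⟨hdu, huw, hum⟩ := U
  -- key equivalence: A's checks all pass ↔ the two-phase walk reaches the last index
  have key : ((∀ i < md, A.getD (i+1) 0 < A.getD i 0) ∧
      (∀ i, md ≤ i → i + 1 < n → A.getD i 0 < A.getD (i+1) 0)) ↔ u = n - 1 := by
    constructor
    · rintro ⟨c1, c2⟩
      have hdmd : d = md := by
        refine walk_unique (P := fun t => t + 1 < A.length ∧ A.getD t 0 > A.getD (t+1) 0)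
          (Nat.zero_le d) (Nat.zero_le md) hdw (fun t _ ht => ⟨by omega, c1 t ht⟩) hdm ?_
        rintro ⟨h1, h2⟩
        exact absurd (c2 md (le_refl md) (by omega)) (by omega)
      refine walk_unique (P := fun t => t + 1 < A.length ∧ A.getD t 0 < A.getD (t+1) 0)
        hdu (by omega) huw (fun t ht1 ht2 => ⟨by omega, c2 t (by omega) (by omega)⟩) hum ?_
      rintro ⟨h1, _⟩
      omega
    · intro hend
      have hdlt : d < n := by omega
      have down : ∀ p q, 0 ≤ p → p < q → q ≤ d → A.getD q 0 < A.getD p 0 :=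
        chain_desc (fun j => A.getD j 0) 0 d (fun t ht1 ht2 => (hdw t ht1 ht2).2)
      have up : ∀ p q, d ≤ p → p < q → q ≤ n - 1 → A.getD p 0 < A.getD q 0 :=
        chain_asc (fun j => A.getD j 0) d (n-1)
          (fun t ht1 ht2 => (huw t ht1 (by omega)).2)
      have hAd : A.getD d 0 = m := by
        have hmd' : m ≤ A.getD d 0 := hmmin _ (getD_mem A d (by omega))
        rcases lt_trichotomy k d with h | h | h
        · have := down k d (Nat.zero_le k) h (le_refl d)
          omega
        · rw [← h]; exact hkm
        · have := up d k (le_refl d) h (by omega)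
          omega
      have hmdd : md = d := by
        rcases lt_trichotomy md d with h | h | h
        · have := down md d (Nat.zero_le md) h (le_refl d)
          omega
        · exact h
        · have := up d md (le_refl d) h (by omega)
          omega
      rw [hmdd]
      exact ⟨fun i hi => (hdw i (Nat.zero_le i) hi).2,
        fun i hi1 hi2 => (huw i hi1 (by omega)).2⟩
  by_cases hC : (∀ i < md, A.getD (i+1) 0 < A.getD i 0) ∧
      (∀ i, md ≤ i → i + 1 < n → A.getD i 0 < A.getD (i+1) 0)
  · have h2 : ¬∃ i ∈ List.range' md (n - 1 - md), A.getD i 0 ≥ A.getD (i+1) 0 := by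
      rintro ⟨i, hi, hle⟩
      rw [List.mem_range'_1] at hi
      exact absurd (hC.2 i hi.1 (by omega)) (by omega)
    have h1 : ¬∃ i ∈ List.range md, A.getD i 0 ≤ A.getD (i+1) 0 := by
      rintro ⟨i, hi, hle⟩
      rw [List.mem_range] at hi
      exact absurd (hC.1 i hi) (by omega)
    rw [if_neg h2, if_neg h1, if_pos ⟨hn, key.1 hC⟩]
  · have hR : ¬(0 < n ∧ u = n - 1) := by
      rintro ⟨-, hend⟩
      exact hC (key.2 hend)
    rw [if_neg hR]
    push_neg at hC
    by_cases h1 : ∀ i < md, A.getD (i+1) 0 < A.getD i 0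
    · obtain ⟨i, hi1, hi2, hi3⟩ := hC h1
      rw [if_pos (show ∃ i ∈ List.range' md (n - 1 - md), A.getD i 0 ≥ A.getD (i+1) 0 from
        ⟨i, List.mem_range'_1.2 ⟨hi1, by omega⟩, by omega⟩)]
    · push_neg at h1
      obtain ⟨i, hi1, hi2⟩ := h1
      rw [if_pos (show ∃ i ∈ List.range md, A.getD i 0 ≤ A.getD (i+1) 0 from
        ⟨i, List.mem_range.2 hi1, by omega⟩)]
      split_ifs <;> rfl
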